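-- pv_equiv track=rewrite | github.com/wjstp/algorithm_study | 프로그래머스/unrated/258705. 산 모양 타일링/산 모양 타일링.py | solution
-- ===== SOURCE A (Python) =====
-- def solution(n, tops):
--     answer = 0
--     dp = [0 for _ in range(2*n+2)] # dp[i] i번째까지 모양을 만들 수 있는 경우의 수
--     dp[0] = 1 # 아무것도 없을 떄
--     dp[1] = 1
--     for i in range(2, 2*n+2):
--         if i % 2 == 0 and tops[i//2-1] : # 짝수 & 뿔이 있는 경우
--             dp[i] = (dp[i-1] * 2 + dp[i-2]) % 10007
--         else :
--             dp[i] = (dp[i-1] + dp[i-2]) % 10007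
--
--     answer = dp[2*n+1]
--     return answer
-- ===== SOURCE B (Python) =====
-- def _mmul(X, Y, m):
--     return (((X[0][0]*Y[0][0] + X[0][1]*Y[1][0]) % m, (X[0][0]*Y[0][1] + X[0][1]*Y[1][1]) % m),
--             ((X[1][0]*Y[0][0] + X[1][1]*Y[1][0]) % m, (X[1][0]*Y[0][1] + X[1][1]*Y[1][1]) % m))
--
-- def _mpow(M, e, m):
--     if e == 0:
--         return ((1, 0), (0, 1))
--     H = _mpow(M, e // 2, m)
--     H2 = _mmul(H, H, m)
--     return _mmul(H2, M, m) if e % 2 else H2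
--
-- def solution(n, tops):
--     MOD = 10007
--     flags = [bool(tops[k]) for k in range(n)]
--     # run-length encode the flags (runs kept head-first, newest run at runs[0])
--     runs = []
--     for f in flags:
--         if runs and runs[0][0] == f:
--             runs[0] = (f, runs[0][1] + 1)
--         else:
--             runs.insert(0, (f, 1))
--     # each mountain applies the 2x2 matrix ((1,a),(1,a+1)); a run of c equal
--     # flags is one fast matrix power applied to the state vector
--     v = (1, 1)
--     for f, c in reversed(runs):
--         a = 2 if f else 1
--         M = _mpow(((1, a), (1, a + 1)), c, MOD)
--         v = ((M[0][0]*v[0] + M[0][1]*v[1]) % MOD,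
--              (M[1][0]*v[0] + M[1][1]*v[1]) % MOD)
--     return v[1]
-- ===== Notes on version B (the rewrite author's own statement) =====
-- stated objective: faster
-- what changed: Replaces A's cell-by-cell dp table of size 2n+2 by run-length-encoding the mountain flags and applying, per run of c equal flags, the 2x2 transfer matrix ((1,a),(1,a+1)) raised to the c-th power by binary exponentiation mod 10007.
import Mathlib
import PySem

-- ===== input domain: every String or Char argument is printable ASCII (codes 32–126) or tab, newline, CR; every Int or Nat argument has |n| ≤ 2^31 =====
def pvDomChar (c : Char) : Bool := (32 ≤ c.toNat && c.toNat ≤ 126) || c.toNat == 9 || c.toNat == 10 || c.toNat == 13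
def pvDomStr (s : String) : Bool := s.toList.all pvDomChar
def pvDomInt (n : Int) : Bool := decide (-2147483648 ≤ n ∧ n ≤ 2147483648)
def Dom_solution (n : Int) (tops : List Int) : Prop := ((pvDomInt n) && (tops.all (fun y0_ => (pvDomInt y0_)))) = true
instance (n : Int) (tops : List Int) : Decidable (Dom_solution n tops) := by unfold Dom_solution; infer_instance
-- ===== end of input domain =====

-- B replaces A's cell-by-cell dp table by run-length-encoding the mountain flags and applying one fast 2x2 matrix power per run; same return value.

-- ===== PORT A =====
-- A's loop body: writes dp[i] from dp[i-1], dp[i-2] and tops[i//2-1].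
def solStepA (tops : List Int) (dp : List Int) (i : Int) : List Int :=
  if PySem.Int.mod i 2 = 0 ∧ PySem.List.pyGetD tops (PySem.Int.floordiv i 2 - 1) 0 ≠ 0 then
    PySem.List.pySetD dp i (PySem.Int.mod (PySem.List.pyGetD dp (i-1) 0 * 2 + PySem.List.pyGetD dp (i-2) 0) 10007)
  else
    PySem.List.pySetD dp i (PySem.Int.mod (PySem.List.pyGetD dp (i-1) 0 + PySem.List.pyGetD dp (i-2) 0) 10007)

def solution (n : Int) (tops : List Int) : Int :=
  PySem.List.pyGetD
    ((PySem.List.pyRange 2 (2*n+2) 1).foldl (solStepA tops)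
      (PySem.List.pySetD (PySem.List.pySetD ((PySem.List.pyRange 0 (2*n+2) 1).map (fun _ => 0)) 0 1) 1 1))
    (2*n+1) 0

-- ===== PORT B =====
-- 2x2 matrix multiplication mod 10007 (Source B's _mmul with m = 10007)
def mmulB (X Y : (Int × Int) × (Int × Int)) : (Int × Int) × (Int × Int) :=
  ((PySem.Int.mod (X.1.1*Y.1.1 + X.1.2*Y.2.1) 10007, PySem.Int.mod (X.1.1*Y.1.2 + X.1.2*Y.2.2) 10007),
   (PySem.Int.mod (X.2.1*Y.1.1 + X.2.2*Y.2.1) 10007, PySem.Int.mod (X.2.1*Y.1.2 + X.2.2*Y.2.2) 10007))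

-- Source B's _mpow: binary exponentiation (recursion on e, exactly Source B's recursion)
def mpowB (M : (Int × Int) × (Int × Int)) (e : Nat) : (Int × Int) × (Int × Int) :=
  if _h : e = 0 then ((1, 0), (0, 1))
  else
    let H := mpowB M (e / 2)
    let H2 := mmulB H H
    if e % 2 = 1 then mmulB H2 M else H2
decreasing_by omega

-- Source B's run-length-encoding loop body (newest run kept at the head)
def runsStepB (acc : List (Bool × Nat)) (f : Bool) : List (Bool × Nat) :=
  match acc with
  | (g, c) :: rest => if g = f then (g, c + 1) :: rest else (f, 1) :: (g, c) :: rest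
  | [] => [(f, 1)]

-- apply a matrix to the state vector, entries mod 10007 (Source B's v update)
def mapplyB (M : (Int × Int) × (Int × Int)) (v : Int × Int) : Int × Int :=
  (PySem.Int.mod (M.1.1*v.1 + M.1.2*v.2) 10007, PySem.Int.mod (M.2.1*v.1 + M.2.2*v.2) 10007)

def solution_alt (n : Int) (tops : List Int) : Int :=
  let flags := (PySem.List.pyRange 0 n 1).map (fun k => decide (PySem.List.pyGetD tops k 0 ≠ 0))
  let runs := (flags.foldl runsStepB []).reverse
  (runs.foldl (fun v fc =>
      mapplyB (mpowB ((1, if fc.1 then 2 else 1), (1, (if fc.1 then 2 else 1) + 1)) fc.2) v) (1, 1)).2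

-- ===== PRECONDITION & SPEC =====
-- Pre_ excludes exactly the inputs where A raises IndexError: n < 0 (dp[0]=1 on an empty list) or tops shorter than n (tops[i//2-1]).
def Pre_solution (n : Int) (tops : List Int) : Prop := 0 ≤ n ∧ n ≤ tops.length
instance (n : Int) (tops : List Int) : Decidable (Pre_solution n tops) := by unfold Pre_solution; infer_instance
def pvWitness_solution : Int × List Int := (2, [1, 0])

def Spec_solution (n : Int) (tops : List Int) (out : Int) : Prop := out = solution_alt n tops
instance (n : Int) (tops : List Int) (out : Int) : Decidable (Spec_solution n tops out) := by unfold Spec_solution; infer_instance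

-- ===== CLAIM (what is proved, stated in full; the proofs are below) =====
def Claim_equal_solution : Prop := ∀ (n : Int) (tops : List Int), Dom_solution n tops → Pre_solution n tops → Spec_solution n tops (solution n tops)

-- ===== LEMMAS AND PROOFS =====

-- dp list after A's initialisation, for n = m
def dpInit (m : Nat) : List Int :=
  PySem.List.pySetD (PySem.List.pySetD ((PySem.List.pyRange 0 (2*(m:Int)+2) 1).map (fun _ => 0)) 0 1) 1 1

-- A's dp after the loop has processed i = 2, …, 2k+1
def dpA (tops : List Int) (m k : Nat) : List Int :=
  (PySem.List.pyRange 2 (2*(k:Int)+2) 1).foldl (solStepA tops) (dpInit m)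

-- the rolling pair (dp[2k], dp[2k+1]) obtained by stepping one mountain at a time
def stepV (tops : List Int) (pc : Int × Int) (k : Int) : Int × Int :=
  let mid := if PySem.List.pyGetD tops k 0 ≠ 0
             then PySem.Int.mod (pc.2 * 2 + pc.1) 10007
             else PySem.Int.mod (pc.2 + pc.1) 10007
  (mid, PySem.Int.mod (mid + pc.2) 10007)

def pairB (tops : List Int) (k : Nat) : Int × Int :=
  (PySem.List.pyRange 0 (k:Int) 1).foldl (stepV tops) (1, 1)

theorem length_solStepA (tops : List Int) (dp : List Int) (i : Int) :
    (solStepA tops dp i).length = dp.length := by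
  unfold solStepA
  split <;> simp [PySem.List.length_pySetD]

theorem length_foldl_solStepA (tops : List Int) (l : List Int) (dp : List Int) :
    (l.foldl (solStepA tops) dp).length = dp.length := by
  induction l generalizing dp with
  | nil => rfl
  | cons x xs ih => simp [List.foldl_cons, ih, length_solStepA]

theorem length_dpInit (m : Nat) : (dpInit m).length = 2*m+2 := by
  unfold dpInit
  simp [PySem.List.length_pySetD, PySem.List.length_pyRange_one]
  omega

theorem length_dpA (tops : List Int) (m k : Nat) : (dpA tops m k).length = 2*m+2 := by
  unfold dpA
  rw [length_foldl_solStepA, length_dpInit]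

theorem getD_dpInit (m : Nat) (j : Nat) (hj : j < 2*m+2) :
    (dpInit m).getD j 0 = if j ≤ 1 then 1 else 0 := by
  unfold dpInit
  rw [PySem.List.pySetD_of_nonneg _ _ (by norm_num : (0:Int) ≤ 1),
      PySem.List.pySetD_of_nonneg _ _ (le_refl (0:Int))]
  simp only [Int.toNat_one, Int.toNat_zero]
  have hL : ((PySem.List.pyRange 0 (2*(m:Int)+2) 1).map (fun _ => (0:Int))).length = 2*m+2 := by
    simp [PySem.List.length_pyRange_one]; omega
  rw [List.getD_eq_getElem _ 0 (by simp; omega), List.getElem_set, List.getElem_set]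
  by_cases h0 : j = 0
  · subst h0; simp
  by_cases h1 : j = 1
  · subst h1; simp
  rw [if_neg (by omega), if_neg (by omega), if_neg (by omega)]
  simp

-- A's loop body, rephrased as List.set / getElem at a Nat index
theorem solStepA_eq (tops dp : List Int) (i : Nat) (h2 : 2 ≤ i) (hi : i < dp.length) :
    solStepA tops dp (i:Int) =
      dp.set i (if (i % 2 : Nat) = 0 ∧ PySem.List.pyGetD tops (((i/2 : Nat):Int) - 1) 0 ≠ 0
                then PySem.Int.mod (dp[i-1]'(by omega) * 2 + dp[i-2]'(by omega)) 10007
                else PySem.Int.mod (dp[i-1]'(by omega) + dp[i-2]'(by omega)) 10007) := by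
  unfold solStepA
  have hmod : PySem.Int.mod (i:Int) 2 = ((i % 2 : Nat):Int) := by
    rw [PySem.Int.mod_eq_emod_of_pos (by norm_num)]; omega
  have hdiv : PySem.Int.floordiv (i:Int) 2 = ((i / 2 : Nat):Int) := by
    rw [PySem.Int.floordiv_eq_ediv_of_pos (by norm_num)]; omega
  have g1 : PySem.List.pyGetD dp ((i:Int)-1) 0 = dp[i-1]'(by omega) := by
    rw [PySem.List.pyGetD_eq_getElem dp 0 (by omega) (by omega)]
    congr 1
    omega
  have g2 : PySem.List.pyGetD dp ((i:Int)-2) 0 = dp[i-2]'(by omega) := by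
    rw [PySem.List.pyGetD_eq_getElem dp 0 (by omega) (by omega)]
    congr 1
    omega
  have hset : ∀ v : Int, PySem.List.pySetD dp (i:Int) v = dp.set i v := by
    intro v
    rw [PySem.List.pySetD_of_nonneg _ _ (by positivity)]
    simp
  rw [hmod, hdiv, g1, g2, hset, hset]
  by_cases hc : (i % 2 : Nat) = 0 ∧ PySem.List.pyGetD tops (((i/2 : Nat):Int) - 1) 0 ≠ 0
  · rw [if_pos hc, if_pos ⟨by exact_mod_cast congrArg (Nat.cast : Nat → Int) hc.1, hc.2⟩]
  · rw [if_neg hc, if_neg (by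
      intro ⟨ha, hb⟩
      exact hc ⟨by exact_mod_cast ha, hb⟩)]

theorem pairB_succ (tops : List Int) (k : Nat) :
    pairB tops (k+1) = stepV tops (pairB tops k) (k:Int) := by
  unfold pairB
  have e : (((k+1):Nat):Int) = (k:Int) + 1 := by push_cast; ring
  rw [e, PySem.List.pyRange_one_succ_right (by positivity)]
  simp [List.foldl_append]

-- the invariant: entries 2k and 2k+1 of A's dp array are the rolling pair
theorem inv_dpA_pairB (tops : List Int) (m : Nat) (k : Nat) (hk : k ≤ m) :
    (dpA tops m k)[2*k]'(by rw [length_dpA]; omega) = (pairB tops k).1 ∧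
    (dpA tops m k)[2*k+1]'(by rw [length_dpA]; omega) = (pairB tops k).2 := by
  induction k with
  | zero =>
      have h0 : dpA tops m 0 = dpInit m := by
        unfold dpA
        rw [show (2*((0:Nat):Int)+2) = 2 by norm_num, PySem.List.pyRange_one_eq_nil le_rfl]
        rfl
      have hp : pairB tops 0 = (1,1) := by
        unfold pairB
        rw [Nat.cast_zero, PySem.List.pyRange_one_eq_nil le_rfl]
        rfl
      constructor
      · rw [hp, ← List.getD_eq_getElem _ 0 (by rw [length_dpA]; omega), h0]
        simpa using getD_dpInit m 0 (by omega)
      · rw [hp, ← List.getD_eq_getElem _ 0 (by rw [length_dpA]; omega), h0]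
        simpa using getD_dpInit m 1 (by omega)
  | succ k ih =>
      obtain ⟨ih1, ih2⟩ := ih (by omega)
      have hlen : (dpA tops m k).length = 2*m+2 := length_dpA tops m k
      -- split off the last two loop iterations i = 2k+2 and i = 2k+3
      have hsplit : dpA tops m (k+1)
          = solStepA tops (solStepA tops (dpA tops m k) (((2*k+2 : Nat)):Int)) (((2*k+3 : Nat)):Int) := by
        unfold dpA
        have e1 : (2*(((k+1):Nat):Int)+2) = (((2*k+3 : Nat)):Int) + 1 := by push_cast; ring
        have e2 : (((2*k+3 : Nat)):Int) = (((2*k+2 : Nat)):Int) + 1 := by push_cast; ring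
        rw [e1, PySem.List.pyRange_one_succ_right (by push_cast; omega), e2,
            PySem.List.pyRange_one_succ_right (by push_cast; omega)]
        simp only [List.foldl_append, List.foldl_cons, List.foldl_nil]
        norm_cast
      -- the first of the two iterations
      have hs1 := solStepA_eq tops (dpA tops m k) (2*k+2) (by omega) (by omega)
      have hs2cond : ((2*k+2) % 2 : Nat) = 0 := by omega
      have hs2idx : (((2*k+2)/2 : Nat):Int) - 1 = (k:Int) := by
        have : ((2*k+2)/2 : Nat) = k+1 := by omega
        rw [this]; push_cast; ring
      set P := pairB tops k with hP
      set mid : Int := (stepV tops P (k:Int)).1 with hmid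
      have hmid' : mid = if PySem.List.pyGetD tops (k:Int) 0 ≠ 0
          then PySem.Int.mod (P.2 * 2 + P.1) 10007
          else PySem.Int.mod (P.2 + P.1) 10007 := by
        rw [hmid]; unfold stepV; split <;> simp_all
      have e21 : 2*k+2-1 = 2*k+1 := by omega
      have e22 : 2*k+2-2 = 2*k := by omega
      have hdp1 : solStepA tops (dpA tops m k) (((2*k+2 : Nat)):Int) = (dpA tops m k).set (2*k+2) mid := by
        rw [hs1]
        congr 1
        rw [hmid', hs2idx, hs2cond]
        simp only [e21, e22, ih1, ih2, true_and]
      -- the second iteration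
      have hlen1 : ((dpA tops m k).set (2*k+2) mid).length = 2*m+2 := by simp [hlen]
      have hs3 := solStepA_eq tops ((dpA tops m k).set (2*k+2) mid) (2*k+3) (by omega) (by omega)
      have hs3cond : ¬ (((2*k+3) % 2 : Nat) = 0) := by omega
      have hdp2 : dpA tops m (k+1)
          = ((dpA tops m k).set (2*k+2) mid).set (2*k+3)
              (PySem.Int.mod (mid + P.2) 10007) := by
        rw [hsplit, hdp1, hs3]
        congr 1
        rw [if_neg (by intro h; exact hs3cond h.1)]
        have r1 : ((dpA tops m k).set (2*k+2) mid)[2*k+3-1]'(by omega) = mid := by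
          simp only [show 2*k+3-1 = 2*k+2 by omega]
          rw [List.getElem_set, if_pos rfl]
        have r2 : ((dpA tops m k).set (2*k+2) mid)[2*k+3-2]'(by omega) = P.2 := by
          simp only [show 2*k+3-2 = 2*k+1 by omega]
          rw [List.getElem_set, if_neg (by omega)]
          exact ih2
        rw [r1, r2]
      have hpair : pairB tops (k+1) = (mid, PySem.Int.mod (mid + P.2) 10007) := by
        rw [pairB_succ, hmid]
        unfold stepV
        rfl
      constructor
      · rw [hpair]
        simp only [hdp2, show 2*(k+1) = 2*k+2 by omega]
        rw [List.getElem_set, if_neg (by omega), List.getElem_set, if_pos rfl]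
      · rw [hpair]
        simp only [hdp2, show 2*(k+1)+1 = 2*k+3 by omega]
        rw [List.getElem_set, if_pos rfl]

-- ===== B-side lemmas: matrix powers over runs compute the same rolling pair =====

theorem pm (x : Int) : PySem.Int.mod x 10007 = x % 10007 :=
  PySem.Int.mod_eq_emod_of_pos (by norm_num)

-- congruence absorption: pre-reduced coefficients / components don't change the result mod m
theorem modeq_emod (a : Int) : Int.ModEq 10007 (a % 10007) a :=
  Int.emod_emod_of_dvd a dvd_rfl

theorem cong_coef (a b x y : Int) :
    ((a % 10007) * x + (b % 10007) * y) % 10007 = (a*x + b*y) % 10007 :=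
  (((modeq_emod a).mul_right x).add ((modeq_emod b).mul_right y))

theorem cong_vec (a b x y : Int) :
    (a * (x % 10007) + b * (y % 10007)) % 10007 = (a*x + b*y) % 10007 :=
  (((modeq_emod x).mul_left a).add ((modeq_emod y).mul_left b))

def RedV (v : Int × Int) : Prop := v.1 % 10007 = v.1 ∧ v.2 % 10007 = v.2

theorem redV_mapply (M : (Int × Int) × (Int × Int)) (v : Int × Int) : RedV (mapplyB M v) := by
  unfold RedV mapplyB
  simp only [pm]
  exact ⟨Int.emod_emod_of_dvd _ dvd_rfl, Int.emod_emod_of_dvd _ dvd_rfl⟩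

theorem mapply_id (v : Int × Int) (hv : RedV v) : mapplyB ((1,0),(0,1)) v = v := by
  obtain ⟨h1, h2⟩ := hv
  unfold mapplyB
  simp only [pm]
  simp [h1, h2]

theorem mapply_mmul (X Y : (Int × Int) × (Int × Int)) (v : Int × Int) :
    mapplyB (mmulB X Y) v = mapplyB X (mapplyB Y v) := by
  unfold mapplyB mmulB
  simp only [pm, Prod.mk.injEq]
  refine ⟨?_, ?_⟩ <;> (rw [cong_coef, cong_vec]; ring_nf)

theorem mpow_apply (e : Nat) (M : (Int × Int) × (Int × Int)) (v : Int × Int) (hv : RedV v) :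
    mapplyB (mpowB M e) v = (mapplyB M)^[e] v := by
  induction e using Nat.strong_induction_on generalizing v with
  | _ e ih =>
    rw [mpowB]
    by_cases h0 : e = 0
    · subst h0
      simpa using mapply_id v hv
    · rw [dif_neg h0]
      simp only []
      have ihv : ∀ w, RedV w → mapplyB (mpowB M (e/2)) w = (mapplyB M)^[e/2] w :=
        fun w hw => ih (e/2) (by omega) w hw
      by_cases hodd : e % 2 = 1
      · rw [if_pos hodd, mapply_mmul, mapply_mmul,
            ihv _ (redV_mapply _ _), ihv _ (redV_mapply _ _)]
        rw [← Function.iterate_succ_apply, ← Function.iterate_add_apply]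
        congr 1
        omega
      · rw [if_neg hodd, mapply_mmul, ihv _ (redV_mapply _ _), ihv _ hv,
            ← Function.iterate_add_apply]
        congr 1
        omega

-- flatten a (reversed) run list back into the flag list
def repRun (p : Bool × Nat) : List Bool := List.replicate p.2 p.1

theorem runsStep_flat (acc : List (Bool × Nat)) (f : Bool) :
    (runsStepB acc f).reverse.flatMap repRun = acc.reverse.flatMap repRun ++ [f] := by
  cases acc with
  | nil => simp [runsStepB, repRun]
  | cons p rest =>
    obtain ⟨g, c⟩ := p
    by_cases h : g = f
    · subst h
      simp only [runsStepB, reduceIte]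
      simp [repRun, List.flatMap_append, List.replicate_succ']
    · simp only [runsStepB, if_neg h]
      simp [repRun, List.flatMap_append]

theorem runs_flat (flags : List Bool) (acc : List (Bool × Nat)) :
    (flags.foldl runsStepB acc).reverse.flatMap repRun = acc.reverse.flatMap repRun ++ flags := by
  induction flags generalizing acc with
  | nil => simp
  | cons f rest ih =>
    rw [List.foldl_cons, ih, runsStep_flat, List.append_assoc]
    rfl

theorem foldl_replicate_iterate {α γ : Type} (step : α → γ → α) (c : Nat) (f : γ) (v : α) :
    (List.replicate c f).foldl step v = (fun w => step w f)^[c] v := by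
  induction c generalizing v with
  | zero => rfl
  | succ c ih => rw [List.replicate_succ, List.foldl_cons, ih, ← Function.iterate_succ_apply]

-- one B-run application = c single-flag steps
def baseM (f : Bool) : (Int × Int) × (Int × Int) :=
  ((1, if f then 2 else 1), (1, (if f then 2 else 1) + 1))

theorem mapply_base_step (tops : List Int) (k : Int) (v : Int × Int) :
    mapplyB (baseM (decide (PySem.List.pyGetD tops k 0 ≠ 0))) v = stepV tops v k := by
  unfold mapplyB baseM stepV
  by_cases h : PySem.List.pyGetD tops k 0 ≠ 0
  · rw [decide_eq_true h]
    simp only [pm, if_true, if_pos h, Prod.mk.injEq]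
    refine ⟨by ring_nf, ?_⟩
    rw [show ((v.2*2 + v.1) % 10007 + v.2) % 10007
            = ((v.2*2 + v.1) + v.2) % 10007 from ((modeq_emod _).add_right v.2)]
    ring_nf
  · rw [decide_eq_false h]
    simp only [pm, Prod.mk.injEq, Bool.false_eq_true, if_false, if_neg h]
    refine ⟨by ring_nf, ?_⟩
    rw [show ((v.2 + v.1) % 10007 + v.2) % 10007
            = ((v.2 + v.1) + v.2) % 10007 from ((modeq_emod _).add_right v.2)]
    ring_nf

-- B's run fold equals the single-step fold over the flags
theorem alt_eq_pairB (n : Int) (tops : List Int) :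
    solution_alt n tops = ((PySem.List.pyRange 0 n 1).foldl (stepV tops) (1, 1)).2 := by
  unfold solution_alt
  simp only []
  set flags := (PySem.List.pyRange 0 n 1).map (fun k => decide (PySem.List.pyGetD tops k 0 ≠ 0)) with hflags
  have hflat : (flags.foldl runsStepB []).reverse.flatMap repRun = flags := by
    simpa using runs_flat flags []
  -- run fold = flag fold (each run expanded by mpow_apply + iterate)
  have hrun : ∀ (rl : List (Bool × Nat)) (v : Int × Int), RedV v →
      (rl.foldl (fun v fc =>
        mapplyB (mpowB ((1, if fc.1 then 2 else 1), (1, (if fc.1 then 2 else 1) + 1)) fc.2) v) v)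
      = (rl.flatMap repRun).foldl (fun w f => mapplyB (baseM f) w) v := by
    intro rl
    induction rl with
    | nil => intro v _; rfl
    | cons p rest ih =>
      intro v hv
      rw [List.flatMap_cons, List.foldl_append, List.foldl_cons]
      rw [show ((1, if p.1 then 2 else 1), (1, (if p.1 then 2 else 1) + 1)) = baseM p.1 from rfl]
      rw [mpow_apply p.2 (baseM p.1) v hv,
        show (mapplyB (baseM p.1))^[p.2] v
            = (List.replicate p.2 p.1).foldl (fun w f => mapplyB (baseM f) w) v from
          (foldl_replicate_iterate (fun w f => mapplyB (baseM f) w) p.2 p.1 v).symm,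
        show (List.replicate p.2 p.1).foldl (fun w f => mapplyB (baseM f) w) v
            = (repRun p).foldl (fun w f => mapplyB (baseM f) w) v from rfl]
      rcases Nat.eq_zero_or_pos p.2 with h0 | hp
    -- Red of intermediate: replicate fold output is either v (c=0) or a mapply output
      · simp only [repRun, h0, List.replicate_zero, List.foldl_nil]
        exact ih v hv
      · apply ih
        obtain ⟨c', hc'⟩ : ∃ c', p.2 = c' + 1 := ⟨p.2 - 1, by omega⟩
        simp only [repRun, hc', List.replicate_succ', List.foldl_append, List.foldl_cons, List.foldl_nil]
        exact redV_mapply _ _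
  rw [hrun _ (1,1) (by constructor <;> decide), hflat, hflags, List.foldl_map]
  have hf : (fun (w : Int × Int) (k : Int) => mapplyB (baseM (decide (PySem.List.pyGetD tops k 0 ≠ 0))) w)
      = stepV tops := by
    funext w k
    exact mapply_base_step tops k w
  rw [hf]

-- ===== VERDICT (by name: the statement is the Claim_ definition above) =====
theorem solution_spec : Claim_equal_solution := by
  intro n tops _ hpre
  unfold Pre_solution at hpre
  obtain ⟨m, rfl⟩ := Int.eq_ofNat_of_zero_le hpre.1
  unfold Spec_solution
  have hA : solution (m:Int) tops = PySem.List.pyGetD (dpA tops m m) (2*(m:Int)+1) 0 := rfl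
  have hB : solution_alt (m:Int) tops = (pairB tops m).2 := by
    rw [alt_eq_pairB]
    rfl
  rw [hA, hB, PySem.List.pyGetD_eq_getElem _ 0 (by positivity) (by rw [length_dpA]; push_cast; omega)]
  have ht : (2*(m:Int)+1).toNat = 2*m+1 := by omega
  simp only [ht]
  exact (inv_dpA_pairB tops m m le_rfl).2
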